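-- pv_equiv track=rewrite | github.com/fjmoronUNED/text_generation | repositories/ml_preprocessing/ml_preprocessing/sequences_generator.py | sentences_to_sequences
-- ===== SOURCE A (Python) =====
-- def sentences_to_sequences(sentences, train_len=8, min_sentence_size=2):
--     """
--     create corpus sequence
--     """
--     final_seqs = []
--     for token_group in sentences:
--         for pos_init in range(0, len(token_group) - 1):
--             pos_end_max = len(token_group) - pos_init
--             for pos_end in range(1, min(pos_end_max, train_len)):
--                 seq = token_group[pos_init : (pos_init + pos_end + 1)]
--                 if len(seq) >= min_sentence_size:
--                     final_seqs.append(seq)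
--
--     counter = 1
--     final_dataset = []
--
--     for i in final_seqs:
--         for counter in range(0, len(i)):
--             final_seq = len(i) - 1
--             init_seq = final_seq - counter
--             grammar_sequence = i[init_seq:final_seq] + [i[final_seq]]
--             if len(grammar_sequence) > 1:
--                 final_dataset.append(grammar_sequence)
--
--     return final_dataset
-- ===== SOURCE B (Python) =====
-- def sentences_to_sequences(sentences, train_len=8, min_sentence_size=2):
--     """
--     create corpus sequence (single fused pass, no intermediate list):
--     each output is a suffix tg[end-s:end] of a window tg[p:end].
--     """
--     return [
--         tg[end - s : end]
--         for tg in sentences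
--         for p in range(0, len(tg) - 1)
--         for end in range(p + 2, p + 1 + min(len(tg) - p, train_len))
--         if end - p >= min_sentence_size
--         for s in range(2, end - p + 1)
--     ]
-- ===== Notes on version B (the rewrite author's own statement) =====
-- stated objective: faster
-- what changed: A builds an intermediate final_seqs list of windows in one nested pass and then expands each stored window into its suffixes in a second pass over that list; B is a single fused comprehension that never materialises final_seqs or the window slices, re-indexes by the window's end position, and emits each suffix tg[end-s:end] directly from the token group.
import Mathlib
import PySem

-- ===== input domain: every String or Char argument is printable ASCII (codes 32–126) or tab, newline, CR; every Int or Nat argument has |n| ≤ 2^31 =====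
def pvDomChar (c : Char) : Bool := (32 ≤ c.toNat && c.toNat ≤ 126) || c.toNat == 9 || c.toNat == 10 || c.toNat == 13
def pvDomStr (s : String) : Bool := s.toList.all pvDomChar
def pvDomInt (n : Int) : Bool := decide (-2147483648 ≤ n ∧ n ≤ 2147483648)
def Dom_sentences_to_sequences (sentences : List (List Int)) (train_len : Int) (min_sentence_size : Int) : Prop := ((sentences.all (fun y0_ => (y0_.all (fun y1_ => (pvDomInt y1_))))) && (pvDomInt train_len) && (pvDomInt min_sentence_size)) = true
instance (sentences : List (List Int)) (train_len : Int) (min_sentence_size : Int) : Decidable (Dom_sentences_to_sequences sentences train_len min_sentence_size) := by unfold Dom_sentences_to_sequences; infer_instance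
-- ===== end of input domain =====

-- B fuses A's two passes (build final_seqs of windows, then expand each window into suffixes) into one
-- comprehension emitting each suffix tg[end-s:end] directly (no intermediate list or window slices; measured faster by a constant factor).

-- ===== PORT A =====
def sentences_to_sequences (sentences : List (List Int)) (train_len : Int) (min_sentence_size : Int) : List (List Int) :=
  let final_seqs : List (List Int) :=
    sentences.foldl (fun acc token_group =>
      (PySem.List.pyRange 0 ((token_group.length : Int) - 1) 1).foldl (fun acc pos_init =>
        let pos_end_max : Int := (token_group.length : Int) - pos_init
        (PySem.List.pyRange 1 (min pos_end_max train_len) 1).foldl (fun acc pos_end =>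
          let seq := PySem.List.slice token_group (some pos_init) (some (pos_init + pos_end + 1))
          if min_sentence_size ≤ (seq.length : Int) then acc ++ [seq] else acc) acc) acc) []
  final_seqs.foldl (fun acc i =>
    (PySem.List.pyRange 0 (i.length : Int) 1).foldl (fun acc counter =>
      let final_seq : Int := (i.length : Int) - 1
      let init_seq : Int := final_seq - counter
      -- i[final_seq]: in range, since this loop body runs only when i ≠ [] (range(0, len(i)) nonempty)
      let grammar_sequence := PySem.List.slice i (some init_seq) (some final_seq) ++ [(PySem.List.pyGet? i final_seq).getD 0]
      if 1 < (grammar_sequence.length : Int) then acc ++ [grammar_sequence] else acc) acc) []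

-- ===== PORT B =====
def sentences_to_sequences_alt (sentences : List (List Int)) (train_len : Int) (min_sentence_size : Int) : List (List Int) :=
  sentences.flatMap (fun tg =>
    (PySem.List.pyRange 0 ((tg.length : Int) - 1) 1).flatMap (fun p =>
      ((PySem.List.pyRange (p + 2) (p + 1 + min ((tg.length : Int) - p) train_len) 1).filter
          (fun e => decide (min_sentence_size ≤ e - p))).flatMap (fun e =>
        (PySem.List.pyRange 2 (e - p + 1) 1).map (fun s =>
          PySem.List.slice tg (some (e - s)) (some e)))))

-- ===== PRECONDITION & SPEC =====
def Spec_sentences_to_sequences (sentences : List (List Int)) (train_len : Int) (min_sentence_size : Int) (out : List (List Int)) : Prop := out = sentences_to_sequences_alt sentences train_len min_sentence_size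
instance (sentences : List (List Int)) (train_len : Int) (min_sentence_size : Int) (out : List (List Int)) : Decidable (Spec_sentences_to_sequences sentences train_len min_sentence_size out) := by unfold Spec_sentences_to_sequences; infer_instance

-- ===== CLAIM (what is proved, stated in full; the proofs are below) =====
def Claim_equal_sentences_to_sequences : Prop := ∀ (sentences : List (List Int)) (train_len : Int) (min_sentence_size : Int), Dom_sentences_to_sequences sentences train_len min_sentence_size → Spec_sentences_to_sequences sentences train_len min_sentence_size (sentences_to_sequences sentences train_len min_sentence_size)

-- ===== LEMMAS AND PROOFS =====

def gramA (i : List Int) (c : Int) : List Int :=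
  PySem.List.slice i (some ((i.length : Int) - 1 - c)) (some ((i.length : Int) - 1)) ++
    [(PySem.List.pyGet? i ((i.length : Int) - 1)).getD 0]

def asufA (i : List Int) : List (List Int) :=
  ((PySem.List.pyRange 0 ((i.length : Int)) 1).filter
    (fun c => decide (1 < ((gramA i c).length : Int)))).map (gramA i)

theorem A_flat (s : List (List Int)) (T M : Int) :
    sentences_to_sequences s T M =
    (s.flatMap (fun tg =>
      (PySem.List.pyRange 0 ((tg.length : Int) - 1) 1).flatMap (fun p =>
        ((PySem.List.pyRange 1 (min ((tg.length : Int) - p) T) 1).filter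
            (fun e => decide (M ≤ ((PySem.List.slice tg (some p) (some (p + e + 1))).length : Int)))).map
          (fun e => PySem.List.slice tg (some p) (some (p + e + 1)))))).flatMap asufA := by
  unfold sentences_to_sequences asufA gramA
  simp only [PySem.List.foldl_append_ite, PySem.List.foldl_append_eq_flatMap, List.nil_append]

theorem filter_flatMap' {α β : Type} (l : List α) (q : α → Bool) (g : α → List β) :
    (l.filter q).flatMap g = l.flatMap (fun x => if q x then g x else []) := by
  induction l with
  | nil => rfl
  | cons a t ih => by_cases h : q a <;> simp [h, ih]

theorem gramA_len (W : List Int) (c : Int) (hc0 : 0 ≤ c) (hc : c < (W.length : Int)) :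
    (gramA W c).length = c.toNat + 1 := by
  unfold gramA
  rw [PySem.List.slice_toNat W (by omega) (by omega)]
  simp
  omega

theorem asufA_eq (W : List Int) (h2 : 2 ≤ W.length) :
    asufA W = (PySem.List.pyRange 1 (W.length : Int) 1).map (gramA W) := by
  unfold asufA
  rw [PySem.List.pyRange_one_cons (by exact_mod_cast by omega : (0:Int) < (W.length : Int))]
  rw [List.filter_cons]
  have h0 : (gramA W 0).length = 1 := by rw [gramA_len W 0 le_rfl (by exact_mod_cast by omega)]; rfl
  have hall : (PySem.List.pyRange (0+1) (W.length : Int) 1).filter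
      (fun c => decide (1 < ((gramA W c).length : Int))) = PySem.List.pyRange (0+1) (W.length : Int) 1 := by
    apply List.filter_eq_self.mpr
    intro c hc
    rw [PySem.List.mem_pyRange_one] at hc
    rw [gramA_len W c (by omega) (by omega)]
    simp
    omega
  simp only [h0, hall]
  norm_num
theorem gram_suffix (tg : List Int) (p : Int) (k j : Nat) (hp0 : 0 ≤ p)
    (hkn : p + (k : Int) + 2 ≤ (tg.length : Int)) (hj : j ≤ k) :
    gramA (PySem.List.slice tg (some p) (some (p + (1 + (k : Int)) + 1))) (1 + (j : Int))
      = PySem.List.slice tg (some ((p + 2 + (k : Int)) - (2 + (j : Int)))) (some (p + 2 + (k : Int))) := by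
  have hW : PySem.List.slice tg (some p) (some (p + (1 + (k : Int)) + 1))
      = (tg.drop p.toNat).take (k + 2) := by
    rw [PySem.List.slice_toNat tg (by omega) (by omega)]
    congr 1; omega
  have hlen : ((tg.drop p.toNat).take (k + 2)).length = k + 2 := by
    simp; omega
  rw [hW]
  unfold gramA
  rw [hlen]
  have e1 : ((k + 2 : Nat) : Int) - 1 - (1 + (j : Int)) = ((k - j : Nat) : Int) := by push_cast; omega
  have e2 : ((k + 2 : Nat) : Int) - 1 = ((k + 1 : Nat) : Int) := by push_cast; omega
  rw [e1, e2, PySem.List.slice_natCast]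
  rw [PySem.List.pyGet?_natCast]
  have hget : (List.take (k + 2) (List.drop p.toNat tg))[(k+1 : Nat)]? =
      some (tg[p.toNat + (k + 1)]'(by omega)) := by
    rw [List.getElem?_take_of_lt (by omega), List.getElem?_drop]
    rw [List.getElem?_eq_getElem (by omega)]
  rw [hget]
  have e3 : p + 2 + (k : Int) - (2 + (j : Int)) = p + ((k - j : Nat) : Int) := by omega
  have e4 : p + 2 + (k : Int) = p + ((k + 2 : Nat) : Int) := by omega
  rw [e3, e4, PySem.List.slice_toNat tg (by omega) (by omega)]
  have e5 : (p + ((k + 2 : Nat) : Int)).toNat - (p + ((k - j : Nat) : Int)).toNat = j + 2 := by omega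
  have e6 : (p + ((k - j : Nat) : Int)).toNat = p.toNat + (k - j) := by omega
  rw [e5, e6]
  have e7 : (k + 1) - (k - j) = j + 1 := by omega
  rw [e7, List.drop_take, List.take_take, List.drop_drop]
  have e8 : min (j + 1) (k + 2 - (k - j)) = j + 1 := by omega
  have e9 : p.toNat + (k - j) + (j + 1) = p.toNat + (k + 1) := by omega
  have e10 : (tg.drop (p.toNat + (k - j))).take (j + 2)
      = (tg.drop (p.toNat + (k - j))).take (j + 1) ++ ((tg.drop (p.toNat + (k - j)))[j+1]?).toList := by
    rw [← List.take_add_one]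
  rw [e8, e10, List.getElem?_drop, e9, List.getElem?_eq_getElem (by omega)]
  rfl

theorem per_p (tg : List Int) (T M p : Int) (hp0 : 0 ≤ p) :
    ((PySem.List.pyRange 1 (min ((tg.length : Int) - p) T) 1).flatMap (fun e =>
       if decide (M ≤ ((PySem.List.slice tg (some p) (some (p + e + 1))).length : Int))
       then asufA (PySem.List.slice tg (some p) (some (p + e + 1))) else []))
    = ((PySem.List.pyRange (p + 2) (p + 1 + min ((tg.length : Int) - p) T) 1).flatMap (fun e =>
        if decide (M ≤ e - p)
        then (PySem.List.pyRange 2 (e - p + 1) 1).map (fun s => PySem.List.slice tg (some (e - s)) (some e))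
        else [])) := by
  rw [PySem.List.pyRange_one 1, PySem.List.pyRange_one (p + 2)]
  have hb : (p + 1 + min ((tg.length : Int) - p) T - (p + 2)) = min ((tg.length : Int) - p) T - 1 := by ring
  rw [hb, List.flatMap_map, List.flatMap_map]
  refine List.flatMap_congr ?_
  intro k hk
  rw [List.mem_range] at hk
  have hk' : (k : Int) + 1 < min ((tg.length : Int) - p) T := by omega
  have hkn : p + (k : Int) + 2 ≤ (tg.length : Int) := by omega
  have hW : PySem.List.slice tg (some p) (some (p + (1 + (k : Int)) + 1))
      = (tg.drop p.toNat).take (k + 2) := by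
    rw [PySem.List.slice_toNat tg (by omega) (by omega)]
    congr 1; omega
  have hlen : (PySem.List.slice tg (some p) (some (p + (1 + (k : Int)) + 1))).length = k + 2 := by
    rw [hW]; simp; omega
  have hcnd : (decide (M ≤ ((PySem.List.slice tg (some p) (some (p + (1 + (k : Int)) + 1))).length : Int)))
      = (decide (M ≤ (p + 2 + (k : Int)) - p)) := by
    rw [hlen]
    simp only [decide_eq_decide]
    omega
  rw [hcnd]
  split_ifs with h
  · rw [asufA_eq _ (by omega), hlen]
    have hb2 : ((p + 2 + (k : Int)) - p + 1) = ((k + 2 : Nat) : Int) + 1 := by omega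
    rw [hb2, PySem.List.pyRange_one 1, PySem.List.pyRange_one 2]
    have hb3 : (((k + 2 : Nat) : Int) - 1).toNat = k + 1 := by omega
    have hb4 : (((k + 2 : Nat) : Int) + 1 - 2).toNat = k + 1 := by omega
    rw [hb3, hb4, List.map_map, List.map_map]
    refine List.map_congr_left ?_
    intro j hj
    rw [List.mem_range] at hj
    simpa using gram_suffix tg p k j hp0 hkn (by omega)
  · rfl

theorem sts_main (s : List (List Int)) (T M : Int) :
    sentences_to_sequences s T M = sentences_to_sequences_alt s T M := by
  rw [A_flat, List.flatMap_assoc]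
  unfold sentences_to_sequences_alt
  refine List.flatMap_congr ?_
  intro tg _
  rw [List.flatMap_assoc]
  refine List.flatMap_congr ?_
  intro p hp
  rw [PySem.List.mem_pyRange_one] at hp
  rw [List.flatMap_map, filter_flatMap', filter_flatMap']
  exact per_p tg T M p hp.1

-- ===== VERDICT (by name: the statement is the Claim_ definition above) =====
theorem sentences_to_sequences_spec : Claim_equal_sentences_to_sequences := by
  intro s t m _
  exact sts_main s t m
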